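-- pv_equiv track=rewrite | github.com/bellecode20/algorithm-archive | 순재/2026-01/14_boj_이차원배열과연산.py | r_operation
-- ===== SOURCE A (Python) =====
-- from collections import Counter
--
-- def r_operation(arr):
--     new_arr = []
--     max_len = 0
--     for row in arr:
--         cnt = Counter([x for x in row if x != 0])
--         items = sorted(cnt.items(), key=lambda x: (x[1], x[0]))
--         new_row = []
--         for num, freq in items:
--             new_row.append(num)
--             new_row.append(freq)
--         max_len = max(max_len, len(new_row))
--         new_arr.append(new_row)
--     for row in new_arr:
--         while len(row) < max_len:
--             row.append(0)
--         if len(row) > 100: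
--             del row[100:]
--     return new_arr
-- ===== SOURCE B (Python) =====
-- def r_operation(arr):
--     rows = []
--     for row in arr:
--         vals = sorted(x for x in row if x != 0)
--         pairs = []
--         i, n = 0, len(vals)
--         while i < n:
--             j = i + 1
--             while j < n and vals[j] == vals[i]:
--                 j += 1
--             pairs.append((vals[i], j - i))
--             i = j
--         pairs.sort(key=lambda p: (p[1], p[0]))
--         rows.append([t for p in pairs for t in p])
--     width = min(100, max((len(r) for r in rows), default=0))
--     return [(r + [0] * (width - len(r)))[:width] for r in rows]
-- ===== Notes on version B (the rewrite author's own statement) =====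
-- stated objective: alternative
-- what changed: Per-row counting by Counter hash map is replaced by sort-then-scan of consecutive equal runs with two index pointers, and A's pad-to-max-then-truncate second loop is replaced by computing the final width min(100, max row length) once and padding/truncating each row to it in one comprehension.
import Mathlib
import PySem

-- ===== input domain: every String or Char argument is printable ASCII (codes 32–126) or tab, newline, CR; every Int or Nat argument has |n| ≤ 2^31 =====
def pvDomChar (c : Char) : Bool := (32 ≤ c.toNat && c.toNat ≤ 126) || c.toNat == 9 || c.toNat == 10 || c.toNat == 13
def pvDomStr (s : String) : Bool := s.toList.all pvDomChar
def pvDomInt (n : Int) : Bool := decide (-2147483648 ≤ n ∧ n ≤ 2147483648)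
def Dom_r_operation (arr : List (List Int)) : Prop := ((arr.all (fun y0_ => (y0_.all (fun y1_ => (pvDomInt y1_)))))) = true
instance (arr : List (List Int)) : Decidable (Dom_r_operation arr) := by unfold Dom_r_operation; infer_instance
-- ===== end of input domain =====

-- B replaces A's per-row Counter hash map by sorting the nonzero values and scanning
-- consecutive equal runs, and replaces A's pad-to-max-then-truncate second loop by
-- padding/truncating each row once to a width computed up front; same return value.

-- ===== PORT A =====
def r_operation (arr : List (List Int)) : List (List Int) :=
  -- first loop: build new_arr and max_len together
  let st := arr.foldl (fun (st : List (List Int) × Nat) row =>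
    let cnt := PySem.Dict.counter (row.filter (fun x => decide (x ≠ 0)));
    let items := PySem.List.sorted2 cnt.items (fun p => p.2) (fun p => p.1) false;
    let newRow := items.foldl (fun acc p => (acc ++ [p.1]) ++ [p.2]) [];
    (st.1 ++ [newRow], max st.2 newRow.length)) ([], 0);
  -- second loop: pad with zeros up to max_len, then delete everything past index 100
  st.1.map (fun row =>
    let row := row ++ List.replicate (st.2 - row.length) 0;
    if row.length > 100 then row.take 100 else row)

-- ===== PORT B =====
-- inner while loop of B: length of the leading run of elements equal to vals[i]
def pvRun (v : Int) : List Int → Nat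
  | [] => 0
  | x :: xs => if x = v then pvRun v xs + 1 else 0

-- outer while loop of B: the consecutive equal runs of vals as (value, count) pairs
def pvRuns : List Int → List (Int × Int)
  | [] => []
  | v :: rest =>
    let k := pvRun v rest;
    (v, (k : Int) + 1) :: pvRuns (rest.drop k)
termination_by l => l.length
decreasing_by simp [List.length_drop]

def r_operation_alt (arr : List (List Int)) : List (List Int) :=
  let rows := arr.map (fun row =>
    let vals := PySem.List.sorted (row.filter (fun x => decide (x ≠ 0))) (fun x => x) false;
    let pairs := PySem.List.sorted2 (pvRuns vals) (fun p => p.2) (fun p => p.1) false;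
    pairs.flatMap (fun p => [p.1, p.2]));
  let width := min 100 (rows.foldl (fun m r => max m r.length) 0);
  rows.map (fun r => (r ++ List.replicate (width - r.length) 0).take width)

-- ===== PRECONDITION & SPEC =====
def Spec_r_operation (arr : List (List Int)) (out : List (List Int)) : Prop := out = r_operation_alt arr
instance (arr : List (List Int)) (out : List (List Int)) : Decidable (Spec_r_operation arr out) := by unfold Spec_r_operation; infer_instance

-- ===== CLAIM (what is proved, stated in full; the proofs are below) =====
def Claim_equal_r_operation : Prop := ∀ (arr : List (List Int)), Dom_r_operation arr → Spec_r_operation arr (r_operation arr)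

-- ===== LEMMAS AND PROOFS =====

-- proof-side names for the two per-row computations (definitionally the loop bodies)
def pvRowA (row : List Int) : List Int :=
  (PySem.List.sorted2 (PySem.Dict.counter (row.filter (fun x => decide (x ≠ 0)))).items
    (fun p => p.2) (fun p => p.1) false).foldl (fun acc p => (acc ++ [p.1]) ++ [p.2]) []

def pvRowB (row : List Int) : List Int :=
  (PySem.List.sorted2
    (pvRuns (PySem.List.sorted (row.filter (fun x => decide (x ≠ 0))) (fun x => x) false))
    (fun p => p.2) (fun p => p.1) false).flatMap (fun p => [p.1, p.2])

-- Python's tuple sort key (k1, k2) is the single lexicographic key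
theorem pv_sorted2_eq_sorted_lex {α : Type} (xs : List α) (k1 k2 : α → Int) :
    PySem.List.sorted2 xs k1 k2 false
      = PySem.List.sorted xs (fun x => toLex (k1 x, k2 x)) false := by
  unfold PySem.List.sorted2 PySem.List.sorted
  simp only [if_neg (by decide : ¬ (false = true))]
  congr 1
  funext acc x
  congr 1
  funext a b
  have hlex : (toLex (k1 a, k2 a) < toLex (k1 b, k2 b)) ↔ (k1 a < k1 b ∨ k1 a = k1 b ∧ k2 a < k2 b) := Prod.Lex.lt_iff
  rcases lt_trichotomy (k1 a) (k1 b) with h | h | h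
  · simp [hlex, h, lt_asymm h]
  · have hlex' : (toLex (k1 b, k2 a) < toLex (k1 b, k2 b)) ↔ (k1 b < k1 b ∨ k1 b = k1 b ∧ k2 a < k2 b) := Prod.Lex.lt_iff
    simp [h, hlex']
  · simp [hlex, h, lt_asymm h, ne_of_gt h]

theorem pvRun_drop (v : Int) (l : List Int) :
    l.drop (pvRun v l) = l.dropWhile (fun x => x == v) := by
  induction l with
  | nil => rfl
  | cons x xs ih => by_cases h : x = v <;> simp [pvRun, h, ih]

theorem pvRun_take (v : Int) (l : List Int) :
    l.take (pvRun v l) = List.replicate (pvRun v l) v := by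
  induction l with
  | nil => rfl
  | cons x xs ih => by_cases h : x = v <;> simp [pvRun, h, ih, List.replicate_succ]

-- runs of a sorted list are its distinct values with their multiplicities
theorem pv_runs_perm (l : List Int) (h : l.Pairwise (· ≤ ·)) :
    (pvRuns l).Perm ((PySem.List.dedup l).map (fun v => (v, (l.count v : Int)))) := by
  induction l using pvRuns.induct with
  | case1 => simp [pvRuns, PySem.List.dedup]
  | case2 v rest _k0 ih =>
    rw [pvRuns]
    set k := pvRun v rest with hk
    set l' := rest.drop k with hl'
    have hsplit : rest = List.replicate k v ++ l' := by
      conv_lhs => rw [← List.take_append_drop k rest]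
      rw [show List.take k rest = List.replicate k v from pvRun_take v rest]
    have hrest : rest.Pairwise (· ≤ ·) := (List.pairwise_cons.mp h).2
    have hvle : ∀ x ∈ rest, v ≤ x := (List.pairwise_cons.mp h).1
    have hl'pw : l'.Pairwise (· ≤ ·) := hrest.sublist (List.drop_sublist k rest)
    have hvnot : v ∉ l' := by
      intro hv
      rw [hl', pvRun_drop] at hv
      rcases hx : rest.dropWhile (fun x => x == v) with _ | ⟨w, t⟩
      · rw [hx] at hv; exact absurd hv (List.not_mem_nil)
      · have hw : (w == v) = false := by
          have := List.head?_dropWhile_not (fun x => x == v) rest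
          rw [hx] at this; simpa using this
        have hwne : w ≠ v := by simpa using hw
        have hwmem : w ∈ rest := by
          have : w ∈ rest.dropWhile (fun x => x == v) := by rw [hx]; exact List.mem_cons_self
          exact (List.dropWhile_sublist _).mem this
        have hvw : v < w := lt_of_le_of_ne (hvle w hwmem) (Ne.symm hwne)
        rw [hx] at hv
        rcases List.mem_cons.mp hv with rfl | hvt
        · exact hwne rfl
        · have hl'pw' : (w :: t).Pairwise (· ≤ ·) := by
            rw [hl', pvRun_drop, hx] at hl'pw; exact hl'pw
          have : w ≤ v := (List.pairwise_cons.mp hl'pw').1 v hvt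
          omega
    have hcountv : ((v :: rest).count v : Int) = (k : Int) + 1 := by
      rw [List.count_cons_self, hsplit, List.count_append]
      have h1 : (List.replicate k v).count v = k := by simp
      have h2 : l'.count v = 0 := List.count_eq_zero.mpr hvnot
      omega
    have hcountw : ∀ w ∈ l', ((v :: rest).count w : Int) = (l'.count w : Int) := by
      intro w hw
      have hwne : w ≠ v := fun e => hvnot (e ▸ hw)
      rw [hsplit]
      simp [List.count_append, List.count_replicate, Ne.symm hwne]
    have hded : (PySem.List.dedup (v :: rest)).Perm (v :: PySem.List.dedup l') := by
      rw [List.perm_ext_iff_of_nodup (PySem.List.nodup_dedup _)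
        (List.nodup_cons.mpr ⟨fun hv => hvnot ((PySem.List.mem_dedup _ _).mp hv), PySem.List.nodup_dedup l'⟩)]
      intro a
      simp only [PySem.List.mem_dedup, List.mem_cons]
      constructor
      · rintro (rfl | ha)
        · exact Or.inl rfl
        · rw [hsplit] at ha
          rcases List.mem_append.mp ha with hrep | hl
          · exact Or.inl (List.eq_of_mem_replicate hrep)
          · exact Or.inr hl
      · rintro (rfl | ha)
        · exact Or.inl rfl
        · exact Or.inr (by rw [hsplit]; exact List.mem_append_right _ ha)
    have ihp := ih hl'pw
    refine List.Perm.trans (ihp.cons ((v, (k : Int) + 1))) ?_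
    have h1 : ((v : Int), (k : Int) + 1) = (v, ((v :: rest).count v : Int)) := by rw [hcountv]
    have h2 : (PySem.List.dedup l').map (fun w => (w, (l'.count w : Int)))
        = (PySem.List.dedup l').map (fun w => (w, ((v :: rest).count w : Int))) :=
      List.map_congr_left (fun w hw => by rw [hcountw w ((PySem.List.mem_dedup _ _).mp hw)])
    have hmap : ((v, (k : Int) + 1) :: (PySem.List.dedup l').map (fun w => (w, (l'.count w : Int))))
        = (v :: PySem.List.dedup l').map (fun w => (w, ((v :: rest).count w : Int))) := by
      rw [List.map_cons, ← h1, ← h2]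
    rw [hmap]
    exact (hded.map _).symm

-- sorted-by-(count,value) pairs: Counter items vs runs of the sorted values
theorem pv_pairs_eq (nz : List Int) :
    PySem.List.sorted2 (PySem.Dict.counter nz).items (fun p => p.2) (fun p => p.1) false
      = PySem.List.sorted2 (pvRuns (PySem.List.sorted nz (fun x => x) false))
          (fun p => p.2) (fun p => p.1) false := by
  rw [pv_sorted2_eq_sorted_lex, pv_sorted2_eq_sorted_lex]
  set s := PySem.List.sorted nz (fun x => x) false with hs
  have hsp : s.Perm nz := PySem.List.sorted_perm nz _ _
  have hspw : s.Pairwise (· ≤ ·) := by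
    have := PySem.List.sorted_pairwise nz (fun x => x)
    simpa using this
  have hperm1 : (pvRuns s).Perm ((PySem.List.dedup s).map (fun v => (v, (s.count v : Int)))) :=
    pv_runs_perm s hspw
  have hded : (PySem.List.dedup s).Perm (PySem.List.dedup nz) := by
    rw [List.perm_ext_iff_of_nodup (PySem.List.nodup_dedup _) (PySem.List.nodup_dedup _)]
    intro a
    rw [PySem.List.mem_dedup, PySem.List.mem_dedup]
    exact ⟨fun h => hsp.mem_iff.mp h, fun h => hsp.mem_iff.mpr h⟩
  have hcnt : ∀ v : Int, s.count v = nz.count v := fun v => hsp.count_eq v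
  have hperm2 : ((PySem.List.dedup s).map (fun v => (v, (s.count v : Int)))).Perm
      ((PySem.List.dedup nz).map (fun v => (v, (nz.count v : Int)))) := by
    have he : (fun (v : Int) => (v, (s.count v : Int))) = (fun v => (v, (nz.count v : Int))) := by
      funext v; rw [hcnt v]
    rw [he]
    exact hded.map _
  have hitems : (PySem.Dict.counter nz).items
      = (PySem.List.dedup nz).map (fun v => (v, (nz.count v : Int))) := by
    rw [PySem.Dict.items_counter]
    simp [PySem.List.dedup_eq_ofList]
  have hperm : ((pvRuns s)).Perm ((PySem.Dict.counter nz).items) := by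
    rw [hitems]; exact hperm1.trans hperm2
  have hinj : Function.Injective (fun (p : Int × Int) => toLex (p.2, p.1)) := by
    intro p q hpq
    have := toLex.injective hpq
    have h1 : p.2 = q.2 := congrArg Prod.fst this
    have h2 : p.1 = q.1 := congrArg Prod.snd this
    exact Prod.ext h2 h1
  exact PySem.List.sorted_eq_sorted_of_perm _ _ _ hinj hperm.symm

-- the two per-row computations agree
theorem pv_row_eq (row : List Int) : pvRowA row = pvRowB row := by
  unfold pvRowA pvRowB
  rw [pv_pairs_eq]
  set l := PySem.List.sorted2 (pvRuns (PySem.List.sorted (row.filter (fun x => decide (x ≠ 0))) (fun x => x) false)) (fun p => p.2) (fun p => p.1) false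
  have h : (fun (acc : List Int) (p : Int × Int) => (acc ++ [p.1]) ++ [p.2])
      = fun acc p => acc ++ [p.1, p.2] := by
    funext acc p; simp
  rw [h, PySem.List.foldl_append_eq_flatMap]
  simp

-- the pad/truncate step agrees row by row

-- the pad/truncate step agrees row by row
theorem pv_pad_eq (r : List Int) (M : Nat) (hle : r.length ≤ M) :
    (let row := r ++ List.replicate (M - r.length) 0;
     if row.length > 100 then row.take 100 else row)
      = (r ++ List.replicate (min 100 M - r.length) 0).take (min 100 M) := by
  have hlen : (r ++ List.replicate (M - r.length) 0).length = M := by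
    simp; omega
  by_cases hM : M > 100
  · rw [if_pos (by rw [hlen]; omega)]
    have hmin : min 100 M = 100 := by omega
    rw [hmin]
    rw [List.take_append, List.take_append,
      List.take_replicate, List.take_replicate]
    congr 1
    congr 1
    omega
  · rw [if_neg (by rw [hlen]; omega)]
    have hmin : min 100 M = M := by omega
    rw [hmin]
    exact (List.take_of_length_le (by rw [hlen])).symm

theorem pv_main (arr : List (List Int)) : r_operation arr = r_operation_alt arr := by
  show (let st := arr.foldl (fun (st : List (List Int) × Nat) row =>
      (st.1 ++ [pvRowA row], max st.2 (pvRowA row).length)) ([], 0);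
    st.1.map (fun row =>
      let row := row ++ List.replicate (st.2 - row.length) 0;
      if row.length > 100 then row.take 100 else row))
    = (let rows := arr.map pvRowB;
       let width := min 100 (rows.foldl (fun m r => max m r.length) 0);
       rows.map (fun r => (r ++ List.replicate (width - r.length) 0).take width))
  rw [PySem.List.foldl_prod_mk (f := fun acc row => acc ++ [pvRowA row])
    (g := fun m row => max m (pvRowA row).length)]
  rw [PySem.List.foldl_append_singleton_eq_map]
  have hAB : arr.map pvRowA = arr.map pvRowB := List.map_congr_left (fun r _ => pv_row_eq r)
  have hfold : (arr.map pvRowB).foldl (fun m r => max m r.length) 0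
      = arr.foldl (fun m row => max m (pvRowA row).length) 0 := by
    rw [List.foldl_map]
    exact PySem.List.foldl_congr_mem arr (fun m row => max m (pvRowB row).length)
      (fun m row => max m (pvRowA row).length) 0 (fun m row hm => by simp only [pv_row_eq row])
  simp only [List.nil_append, hAB, hfold]
  set M := arr.foldl (fun m row => max m (pvRowA row).length) 0 with hM
  apply List.map_congr_left
  intro r hr
  have hrle : r.length ≤ M := by
    rcases List.mem_map.mp hr with ⟨row, hrow, rfl⟩
    have := (PySem.List.le_foldl_max_nat arr (fun row => (pvRowA row).length) 0).2 row hrow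
    rw [pv_row_eq row] at this
    exact this
  exact pv_pad_eq r M hrle

-- ===== VERDICT (by name: the statement is the Claim_ definition above) =====
theorem r_operation_spec : Claim_equal_r_operation := by
  intro arr _
  exact pv_main arr
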